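-- pv_equiv track=rewrite | github.com/Sulax315/operator-local-desktop | scripts/operator_workflows/excel_financial_extractor.py | _best_cat_col
-- ===== SOURCE A (Python) =====
-- def _best_cat_col(labels: list[str]) -> int:
--     for j, lab in enumerate(labels):
--         if "category" in lab:
--             return j
--     for j, lab in enumerate(labels):
--         if any(k in lab for k in ("trade", "division", "csi", "item", "description")):
--             return j
--     for j, lab in enumerate(labels):
--         if "name" in lab and "code" not in lab and "code name" not in lab:
--             return j
--     return 0
-- ===== SOURCE B (Python) =====
-- def _best_cat_col(labels: list[str]) -> int:
--     def rank(lab: str) -> int: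
--         if "category" in lab:
--             return 1
--         if any(k in lab for k in ("trade", "division", "csi", "item", "description")):
--             return 2
--         if "name" in lab and "code" not in lab:
--             return 3
--         return 4
--
--     best_rank, best_idx = 4, 0
--     for j, lab in enumerate(labels):
--         r = rank(lab)
--         if r < best_rank:
--             best_rank, best_idx = r, j
--     return best_idx
-- ===== Notes on version B (the rewrite author's own statement) =====
-- stated objective: simpler
-- what changed: Replaces A's three sequential full scans (one per keyword tier) by a single pass that maps each label to a priority rank and tracks the smallest rank's first index, dropping the redundant 'code name' test ('code name' in lab already implies 'code' in lab).
import Mathlib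
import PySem

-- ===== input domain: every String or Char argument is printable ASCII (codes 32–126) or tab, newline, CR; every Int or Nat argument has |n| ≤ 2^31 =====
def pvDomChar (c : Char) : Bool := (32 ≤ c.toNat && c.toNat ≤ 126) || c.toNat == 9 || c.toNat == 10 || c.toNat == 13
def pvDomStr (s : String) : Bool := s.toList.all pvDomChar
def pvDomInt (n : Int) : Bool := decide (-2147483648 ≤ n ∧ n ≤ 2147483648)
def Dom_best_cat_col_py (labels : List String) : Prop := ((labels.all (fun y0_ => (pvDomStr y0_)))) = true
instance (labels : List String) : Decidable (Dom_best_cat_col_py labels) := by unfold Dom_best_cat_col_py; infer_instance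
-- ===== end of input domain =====

-- B replaces A's three sequential keyword scans by one single-pass minimum-rank tracking loop; objective: simpler.

-- ===== PORT A =====
def aScanCategory : List String → Int → Option Int
  | [], _ => none
  | lab :: rest, j =>
      if PySem.Str.isIn "category" lab then some j else aScanCategory rest (j + 1)

def aScanKeywords : List String → Int → Option Int
  | [], _ => none
  | lab :: rest, j =>
      if ["trade", "division", "csi", "item", "description"].any (fun k => PySem.Str.isIn k lab)
      then some j else aScanKeywords rest (j + 1)

def aScanName : List String → Int → Option Int
  | [], _ => none
  | lab :: rest, j =>
      if PySem.Str.isIn "name" lab && !PySem.Str.isIn "code" lab && !PySem.Str.isIn "code name" lab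
      then some j else aScanName rest (j + 1)

def best_cat_col_py (labels : List String) : Int :=
  match aScanCategory labels 0 with
  | some j => j
  | none =>
    match aScanKeywords labels 0 with
    | some j => j
    | none =>
      match aScanName labels 0 with
      | some j => j
      | none => 0

-- ===== PORT B =====
def bRank (lab : String) : Nat :=
  if PySem.Str.isIn "category" lab then 1
  else if ["trade", "division", "csi", "item", "description"].any (fun k => PySem.Str.isIn k lab) then 2
  else if PySem.Str.isIn "name" lab && !PySem.Str.isIn "code" lab then 3
  else 4

def bLoop : List String → Int → Nat × Int → Nat × Int
  | [], _, st => st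
  | lab :: rest, j, (br, bi) =>
      let r := bRank lab
      if r < br then bLoop rest (j + 1) (r, j) else bLoop rest (j + 1) (br, bi)

def best_cat_col_py_alt (labels : List String) : Int :=
  (bLoop labels 0 (4, 0)).2

-- ===== PRECONDITION & SPEC =====
def Spec_best_cat_col_py (labels : List String) (out : Int) : Prop := out = best_cat_col_py_alt labels
instance (labels : List String) (out : Int) : Decidable (Spec_best_cat_col_py labels out) := by unfold Spec_best_cat_col_py; infer_instance

-- ===== CLAIM (what is proved, stated in full; the proofs are below) =====
def Claim_equal_best_cat_col_py : Prop := ∀ (labels : List String), Dom_best_cat_col_py labels → Spec_best_cat_col_py labels (best_cat_col_py labels)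

-- ===== LEMMAS AND PROOFS =====

-- the three tier predicates of A
def pCat (lab : String) : Bool := PySem.Str.isIn "category" lab
def pKey (lab : String) : Bool := ["trade", "division", "csi", "item", "description"].any (fun k => PySem.Str.isIn k lab)
def pName (lab : String) : Bool := PySem.Str.isIn "name" lab && !PySem.Str.isIn "code" lab

-- minimum rank over a list (4 if empty / nothing matches)
def mr (labels : List String) : Nat := labels.foldr (fun lab m => min (bRank lab) m) 4

theorem mr_nil : mr [] = 4 := rfl
theorem mr_cons (lab : String) (rest : List String) : mr (lab :: rest) = min (bRank lab) (mr rest) := rfl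

theorem bRank_ge_one (lab : String) : 1 ≤ bRank lab := by
  unfold bRank; split_ifs <;> omega

theorem mr_le_four (labels : List String) : mr labels ≤ 4 := by
  induction labels with
  | nil => simp [mr_nil]
  | cons a rest ih => rw [mr_cons]; omega

theorem bRank_eq_one_iff (lab : String) : bRank lab = 1 ↔ pCat lab = true := by
  unfold bRank pCat; split_ifs <;> simp_all <;> (intros; simp_all)

theorem bRank_eq_two_iff (lab : String) : bRank lab = 2 ↔ (pCat lab = false ∧ pKey lab = true) := by
  unfold bRank pCat pKey; split_ifs <;> simp_all <;> (intros; simp_all)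

theorem bRank_eq_three_iff (lab : String) :
    bRank lab = 3 ↔ (pCat lab = false ∧ pKey lab = false ∧ pName lab = true) := by
  unfold bRank pCat pKey pName; split_ifs <;> simp_all <;> (intros; simp_all)

-- "code name" in lab implies "code" in lab, so A's third test equals pName
theorem codename_imp_code (lab : String) (h : PySem.Str.isIn "code name" lab = true) :
    PySem.Str.isIn "code" lab = true := by
  rw [PySem.Str.isIn_iff_infix] at h ⊢
  exact List.IsInfix.trans (by decide : ("code".toList <:+: "code name".toList)) h

theorem scanName_pred (lab : String) :
    (PySem.Str.isIn "name" lab && !PySem.Str.isIn "code" lab && !PySem.Str.isIn "code name" lab)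
      = pName lab := by
  unfold pName
  cases hc : PySem.Str.isIn "code" lab
  · have hcn : PySem.Str.isIn "code name" lab = false := by
      cases hn : PySem.Str.isIn "code name" lab
      · rfl
      · rw [codename_imp_code lab hn] at hc; cases hc
    rw [hcn]
    simp only [Bool.not_false, Bool.and_true]
  · simp only [Bool.not_true, Bool.and_false, Bool.false_and]

theorem mr_le_of_mem {labels : List String} {lab : String} (h : lab ∈ labels) :
    mr labels ≤ bRank lab := by
  induction labels with
  | nil => cases h
  | cons a rest ih =>
      rw [mr_cons]
      rcases List.mem_cons.mp h with h | h
      · subst h; omega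
      · have := ih h; omega

theorem mr_attained {labels : List String} (h : mr labels ≠ 4) :
    ∃ lab ∈ labels, bRank lab = mr labels := by
  induction labels with
  | nil => simp [mr_nil] at h
  | cons a rest ih =>
      rw [mr_cons] at h ⊢
      by_cases hle : bRank a ≤ mr rest
      · exact ⟨a, List.mem_cons_self, by omega⟩
      · have hr : mr rest ≠ 4 := by omega
        obtain ⟨lab, hmem, heq⟩ := ih hr
        exact ⟨lab, List.mem_cons_of_mem _ hmem, by omega⟩

-- generic helpers on findIdx?/findIdx
theorem findIdx?_congr_mem {α : Type} {p q : α → Bool} :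
    ∀ (l : List α), (∀ x ∈ l, p x = q x) → l.findIdx? p = l.findIdx? q := by
  intro l
  induction l with
  | nil => intro _; rfl
  | cons a rest ih =>
      intro h
      simp only [List.findIdx?_cons]
      rw [h a List.mem_cons_self, ih (fun x hx => h x (List.mem_cons_of_mem _ hx))]

theorem findIdx?_eq_some_findIdx {α : Type} {p : α → Bool} :
    ∀ (l : List α), (∃ x ∈ l, p x = true) → l.findIdx? p = some (l.findIdx p) := by
  intro l
  induction l with
  | nil => rintro ⟨x, hx, _⟩; cases hx
  | cons a rest ih =>
      rintro ⟨x, hx, hp⟩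
      simp only [List.findIdx?_cons, List.findIdx_cons]
      cases ha : p a with
      | true => simp
      | false =>
          rcases List.mem_cons.mp hx with h | h
          · subst h; rw [ha] at hp; cases hp
          · simp only [Bool.false_eq_true, if_false, cond_false]
            rw [ih ⟨x, h, hp⟩]
            simp [List.findIdx_cons]

-- A's scans compute findIdx? with an offset
theorem aScanCategory_eq (labels : List String) :
    ∀ j : Int, aScanCategory labels j = (labels.findIdx? pCat).map (fun k => j + (k : Int)) := by
  induction labels with
  | nil => intro j; rfl
  | cons a rest ih =>
      intro j
      rw [List.findIdx?_cons]
      simp only [aScanCategory]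
      cases h : pCat a
      · have h' := h; unfold pCat at h'; rw [h']
        simp only [Bool.false_eq_true, if_false, ih (j + 1), Option.map_map]
        cases hf : rest.findIdx? pCat
        · simp [hf]
        · simp [hf]
          push_cast
          ring
      · have h' := h; unfold pCat at h'; rw [h']
        simp

theorem aScanKeywords_eq (labels : List String) :
    ∀ j : Int, aScanKeywords labels j = (labels.findIdx? pKey).map (fun k => j + (k : Int)) := by
  induction labels with
  | nil => intro j; rfl
  | cons a rest ih =>
      intro j
      rw [List.findIdx?_cons]
      simp only [aScanKeywords]
      cases h : pKey a
      · have h' := h; unfold pKey at h'; rw [h']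
        simp only [Bool.false_eq_true, if_false, ih (j + 1), Option.map_map]
        cases hf : rest.findIdx? pKey
        · simp [hf]
        · simp [hf]
          push_cast
          ring
      · have h' := h; unfold pKey at h'; rw [h']
        simp

theorem aScanName_eq (labels : List String) :
    ∀ j : Int, aScanName labels j = (labels.findIdx? pName).map (fun k => j + (k : Int)) := by
  induction labels with
  | nil => intro j; rfl
  | cons a rest ih =>
      intro j
      rw [List.findIdx?_cons]
      simp only [aScanName, scanName_pred]
      cases h : pName a
      · simp only [Bool.false_eq_true, if_false, ih (j + 1), Option.map_map]
        cases hf : rest.findIdx? pName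
        · simp [hf]
        · simp [hf]
          push_cast
          ring
      · simp

-- B's loop returns the first index attaining the minimum rank (when it improves on br)
theorem bLoop_spec (labels : List String) :
    ∀ (j : Int) (br : Nat) (bi : Int), br ≤ 4 →
      bLoop labels j (br, bi) =
        if mr labels < br
        then (mr labels, j + (labels.findIdx (fun lab => bRank lab == mr labels) : Int))
        else (br, bi) := by
  induction labels with
  | nil => intro j br bi hbr; rw [mr_nil, if_neg (by omega)]; rfl
  | cons a rest ih =>
      intro j br bi hbr
      rw [mr_cons]
      simp only [bLoop]
      by_cases hA : bRank a < br
      · rw [if_pos hA, ih _ _ _ (by omega)]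
        by_cases h1 : mr rest < bRank a
        · have hmin : min (bRank a) (mr rest) = mr rest := by omega
          rw [if_pos h1, hmin, if_pos (by omega)]
          have hne : (bRank a == mr rest) = false := by simp; omega
          simp [List.findIdx_cons, hne]
          push_cast
          ring
        · have hmin : min (bRank a) (mr rest) = bRank a := by omega
          rw [if_neg h1, hmin, if_pos hA]
          simp [List.findIdx_cons]
      · rw [if_neg hA, ih _ _ _ hbr]
        by_cases h1 : mr rest < br
        · have hmin : min (bRank a) (mr rest) = mr rest := by omega
          rw [if_pos h1, hmin, if_pos h1]
          have hne : (bRank a == mr rest) = false := by simp; omega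
          simp [List.findIdx_cons, hne]
          push_cast
          ring
        · rw [if_neg h1, if_neg (by omega)]

theorem alt_eq (labels : List String) :
    best_cat_col_py_alt labels =
      if mr labels < 4
      then (labels.findIdx (fun lab => bRank lab == mr labels) : Int)
      else 0 := by
  unfold best_cat_col_py_alt
  rw [bLoop_spec _ _ _ _ (by omega)]
  by_cases h : mr labels < 4
  · simp [h]
  · simp [h]

-- ===== VERDICT (by name: the statement is the Claim_ definition above) =====
theorem best_cat_col_py_spec : Claim_equal_best_cat_col_py := by
  intro labels _
  unfold Spec_best_cat_col_py
  rw [alt_eq]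
  unfold best_cat_col_py
  rw [aScanCategory_eq, aScanKeywords_eq, aScanName_eq]
  have hmr4 : mr labels ≤ 4 := mr_le_four labels
  by_cases h4 : mr labels = 4
  -- no tier matches: all three findIdx? are none, both sides 0
  · have hall : ∀ lab ∈ labels, pCat lab = false ∧ pKey lab = false ∧ pName lab = false := by
      intro lab hmem
      have h1 := mr_le_of_mem hmem
      rw [h4] at h1
      refine ⟨?_, ?_, ?_⟩
      · cases hc : pCat lab
        · rfl
        · have := (bRank_eq_one_iff lab).mpr hc; omega
      · cases hc : pKey lab
        · rfl
        · cases hc1 : pCat lab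
          · have := (bRank_eq_two_iff lab).mpr ⟨hc1, hc⟩; omega
          · have := (bRank_eq_one_iff lab).mpr hc1; omega
      · cases hc : pName lab
        · rfl
        · exfalso
          cases hc1 : pCat lab
          · cases hc2 : pKey lab
            · have := (bRank_eq_three_iff lab).mpr ⟨hc1, hc2, hc⟩; omega
            · have := (bRank_eq_two_iff lab).mpr ⟨hc1, hc2⟩; omega
          · have := (bRank_eq_one_iff lab).mpr hc1; omega
    have h1 : labels.findIdx? pCat = none :=
      List.findIdx?_eq_none_iff.mpr (fun x hx => (hall x hx).1)
    have h2 : labels.findIdx? pKey = none :=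
      List.findIdx?_eq_none_iff.mpr (fun x hx => (hall x hx).2.1)
    have h3 : labels.findIdx? pName = none :=
      List.findIdx?_eq_none_iff.mpr (fun x hx => (hall x hx).2.2)
    simp [h1, h2, h3, h4]
  · have h4' : mr labels < 4 := by omega
    obtain ⟨w, hwmem, hw⟩ := mr_attained h4
    have hge1 := bRank_ge_one w
    rw [if_pos h4']
    -- every member has rank ≥ mr
    have hge : ∀ lab ∈ labels, mr labels ≤ bRank lab := fun lab h => mr_le_of_mem h
    interval_cases h : (mr labels)
    · omega
    · -- mr = 1 : first scan fires at the same index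
      have hp : ∀ x ∈ labels, pCat x = (bRank x == 1) := by
        intro x _
        cases hc : pCat x
        · simp
          intro he
          exact absurd ((bRank_eq_one_iff x).mp he) (by simp [hc])
        · simp [(bRank_eq_one_iff x).mpr hc]
      rw [findIdx?_congr_mem labels hp,
          findIdx?_eq_some_findIdx labels ⟨w, hwmem, by simp [hw]⟩]
      simp
    · -- mr = 2 : first scan misses everywhere, second fires
      have hnone1 : labels.findIdx? pCat = none := by
        apply List.findIdx?_eq_none_iff.mpr
        intro x hx
        cases hc : pCat x
        · rfl
        · have := (bRank_eq_one_iff x).mpr hc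
          have := hge x hx
          omega
      have hp : ∀ x ∈ labels, pKey x = (bRank x == 2) := by
        intro x hx
        have hcx : pCat x = false := by
          cases hc : pCat x
          · rfl
          · have := (bRank_eq_one_iff x).mpr hc
            have := hge x hx
            omega
        cases hc : pKey x
        · simp
          intro he
          exact absurd ((bRank_eq_two_iff x).mp he).2 (by simp [hc])
        · simp [(bRank_eq_two_iff x).mpr ⟨hcx, hc⟩]
      rw [hnone1, findIdx?_congr_mem labels hp,
          findIdx?_eq_some_findIdx labels ⟨w, hwmem, by simp [hw]⟩]
      simp
    · -- mr = 3 : first two scans miss everywhere, third fires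
      have hnone1 : labels.findIdx? pCat = none := by
        apply List.findIdx?_eq_none_iff.mpr
        intro x hx
        cases hc : pCat x
        · rfl
        · have := (bRank_eq_one_iff x).mpr hc
          have := hge x hx
          omega
      have hnone2 : labels.findIdx? pKey = none := by
        apply List.findIdx?_eq_none_iff.mpr
        intro x hx
        cases hc : pKey x
        · rfl
        · cases hc1 : pCat x
          · have := (bRank_eq_two_iff x).mpr ⟨hc1, hc⟩
            have := hge x hx
            omega
          · have := (bRank_eq_one_iff x).mpr hc1
            have := hge x hx
            omega
      have hp : ∀ x ∈ labels, pName x = (bRank x == 3) := by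
        intro x hx
        have hcx : pCat x = false := by
          cases hc : pCat x
          · rfl
          · have := (bRank_eq_one_iff x).mpr hc
            have := hge x hx
            omega
        have hkx : pKey x = false := by
          cases hc : pKey x
          · rfl
          · have := (bRank_eq_two_iff x).mpr ⟨hcx, hc⟩
            have := hge x hx
            omega
        cases hc : pName x
        · simp
          intro he
          exact absurd ((bRank_eq_three_iff x).mp he).2.2 (by simp [hc])
        · simp [(bRank_eq_three_iff x).mpr ⟨hcx, hkx, hc⟩]
      rw [hnone1, hnone2, findIdx?_congr_mem labels hp,
          findIdx?_eq_some_findIdx labels ⟨w, hwmem, by simp [hw]⟩]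
      simp
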